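-- pv_equiv track=rewrite | github.com/HBinhCT/Q-project | hackerrank/Algorithms/Beautiful Pairs/solution.py | beautifulPairs
-- ===== SOURCE A (Python) =====
-- def beautifulPairs(A, B):
--     count = 0
--     for i in A:
--         if i in B:
--             B.remove(i)
--             count += 1
--     if count < len(A):
--         return count + 1
--     else:
--         return count - 1
-- ===== SOURCE B (Python) =====
-- def beautifulPairs(A, B):
--     sa = sorted(A)
--     sb = sorted(B)
--     count = 0
--     i = j = 0
--     while i < len(sa) and j < len(sb):
--         if sa[i] == sb[j]:
--             count += 1
--             i += 1
--             j += 1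
--         elif sa[i] < sb[j]:
--             i += 1
--         else:
--             j += 1
--     return count + 1 if count < len(A) else count - 1
-- ===== Notes on version B (the rewrite author's own statement) =====
-- stated objective: faster
-- what changed: Replaces the per-element membership test and list.remove (each a linear scan over B) with sorting both lists once and a two-pointer merge that counts the multiset intersection; the +/-1 adjustment is kept.
import Mathlib
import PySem

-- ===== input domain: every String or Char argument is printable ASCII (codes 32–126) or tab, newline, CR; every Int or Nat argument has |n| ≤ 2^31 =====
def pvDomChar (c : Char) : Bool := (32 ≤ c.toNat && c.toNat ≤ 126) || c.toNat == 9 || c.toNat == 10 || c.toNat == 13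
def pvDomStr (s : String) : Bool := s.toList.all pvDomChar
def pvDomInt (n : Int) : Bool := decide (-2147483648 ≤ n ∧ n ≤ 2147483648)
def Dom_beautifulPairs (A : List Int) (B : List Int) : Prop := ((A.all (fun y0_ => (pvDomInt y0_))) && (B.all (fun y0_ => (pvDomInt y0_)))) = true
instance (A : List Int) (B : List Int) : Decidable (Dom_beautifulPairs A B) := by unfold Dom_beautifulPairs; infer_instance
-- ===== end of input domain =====

-- B replaces A's per-element membership/remove scans over B by sorting both lists and a
-- two-pointer merge count (timed measurably faster). Note: Python A mutates its argument B
-- (removes matched elements); the equivalence proved here is about the RETURN value only.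

-- ===== PORT A =====
-- the for-loop: state is (remaining B, count); 'i in B' then 'B.remove(i)' — List.erase
-- removes the first equal element, exactly Python's list.remove for a present element
def bpLoop : List Int → List Int → Int → List Int × Int
  | [], b, c => (b, c)
  | i :: rest, b, c =>
      if i ∈ b then bpLoop rest (b.erase i) (c + 1) else bpLoop rest b c

def beautifulPairs (A : List Int) (B : List Int) : Int :=
  let r := bpLoop A B 0
  if r.2 < (A.length : Int) then r.2 + 1 else r.2 - 1

-- ===== PORT B =====
-- the while-loop over indices i, j into the two sorted lists, rendered as the equivalent
-- recursion consuming the sorted lists from the front (i/j advance = dropping a head)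
def bpMerge : List Int → List Int → Int
  | [], _ => 0
  | _ :: _, [] => 0
  | a :: as, b :: bs =>
      if a = b then bpMerge as bs + 1
      else if a < b then bpMerge as (b :: bs)
      else bpMerge (a :: as) bs
termination_by xs ys => xs.length + ys.length

def beautifulPairs_alt (A : List Int) (B : List Int) : Int :=
  let sa := PySem.List.sorted A (fun x => x) false
  let sb := PySem.List.sorted B (fun x => x) false
  let count := bpMerge sa sb
  if count < (A.length : Int) then count + 1 else count - 1

-- ===== PRECONDITION & SPEC =====
def Spec_beautifulPairs (A : List Int) (B : List Int) (out : Int) : Prop := out = beautifulPairs_alt A B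
instance (A : List Int) (B : List Int) (out : Int) : Decidable (Spec_beautifulPairs A B out) := by unfold Spec_beautifulPairs; infer_instance

-- ===== CLAIM (what is proved, stated in full; the proofs are below) =====
def Claim_equal_beautifulPairs : Prop := ∀ (A : List Int) (B : List Int), Dom_beautifulPairs A B → Spec_beautifulPairs A B (beautifulPairs A B)

-- ===== LEMMAS AND PROOFS =====

-- A's loop count is the multiset-intersection size
theorem bpLoop_snd (A : List Int) : ∀ (B : List Int) (c : Int),
    (bpLoop A B c).2 = c + (((A : Multiset Int) ∩ (B : Multiset Int)).card : Int) := by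
  induction A with
  | nil => intro B c; simp [bpLoop]
  | cons a as ih =>
      intro B c
      by_cases h : a ∈ B
      · have hm : a ∈ (B : Multiset Int) := by simpa using h
        rw [show ((a :: as : List Int) : Multiset Int) = a ::ₘ (as : Multiset Int) from rfl,
            Multiset.cons_inter_of_pos _ hm]
        simp only [bpLoop, if_pos h, ih]
        rw [← Multiset.coe_erase, Multiset.card_cons]
        push_cast
        ring
      · have hm : a ∉ (B : Multiset Int) := by simpa using h
        rw [show ((a :: as : List Int) : Multiset Int) = a ::ₘ (as : Multiset Int) from rfl,
            Multiset.cons_inter_of_neg _ hm]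
        simp only [bpLoop, if_neg h, ih]

-- the two-pointer merge count on sorted lists is the multiset-intersection size
theorem bpMerge_eq_inter : ∀ (X Y : List Int),
    X.Pairwise (· ≤ ·) → Y.Pairwise (· ≤ ·) →
    bpMerge X Y = (((X : Multiset Int) ∩ (Y : Multiset Int)).card : Int)
  | [], Y, _, _ => by simp [bpMerge]
  | _ :: _, [], _, _ => by simp [bpMerge]
  | a :: as, b :: bs, hx, hy => by
      have hx' := (List.pairwise_cons.mp hx).2
      have hy' := (List.pairwise_cons.mp hy).2
      by_cases hab : a = b
      · subst hab
        have hm : a ∈ ((a :: bs : List Int) : Multiset Int) := by simp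
        rw [bpMerge, if_pos rfl,
            show ((a :: as : List Int) : Multiset Int) = a ::ₘ (as : Multiset Int) from rfl,
            Multiset.cons_inter_of_pos _ hm,
            bpMerge_eq_inter as bs hx' hy']
        simp only [show ((a :: bs : List Int) : Multiset Int) = a ::ₘ (bs : Multiset Int) from rfl,
          Multiset.erase_cons_head, Multiset.card_cons]
        push_cast; ring
      · by_cases hlt : a < b
        · -- a < every element of b :: bs, so a is not in it
          have hnot : a ∉ ((b :: bs : List Int) : Multiset Int) := by
            simp only [Multiset.mem_coe, List.mem_cons]
            rintro (rfl | hmem)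
            · exact hab rfl
            · have := List.rel_of_pairwise_cons hy hmem
              omega
          rw [bpMerge, if_neg hab, if_pos hlt,
              show ((a :: as : List Int) : Multiset Int) = a ::ₘ (as : Multiset Int) from rfl,
              Multiset.cons_inter_of_neg _ hnot,
              bpMerge_eq_inter as (b :: bs) hx' hy]
        · -- b < a, symmetric case via commutativity of ∩
          have hba : b < a := by omega
          have hnot : b ∉ ((a :: as : List Int) : Multiset Int) := by
            simp only [Multiset.mem_coe, List.mem_cons]
            rintro (rfl | hmem)
            · exact hab rfl
            · have := List.rel_of_pairwise_cons hx hmem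
              omega
          rw [bpMerge, if_neg hab, if_neg hlt,
              Multiset.inter_comm,
              show ((b :: bs : List Int) : Multiset Int) = b ::ₘ (bs : Multiset Int) from rfl,
              Multiset.cons_inter_of_neg _ hnot,
              ← Multiset.inter_comm,
              bpMerge_eq_inter (a :: as) bs hx hy']
termination_by X Y => X.length + Y.length

theorem counts_agree (A B : List Int) :
    (bpLoop A B 0).2 =
      bpMerge (PySem.List.sorted A (fun x => x) false) (PySem.List.sorted B (fun x => x) false) := by
  have hA : ((PySem.List.sorted A (fun x => x) false : List Int) : Multiset Int) = (A : Multiset Int) :=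
    Quot.sound (PySem.List.sorted_perm ..)
  have hB : ((PySem.List.sorted B (fun x => x) false : List Int) : Multiset Int) = (B : Multiset Int) :=
    Quot.sound (PySem.List.sorted_perm ..)
  rw [bpLoop_snd, bpMerge_eq_inter _ _ (by simpa using PySem.List.sorted_pairwise A (fun x => x))
        (by simpa using PySem.List.sorted_pairwise B (fun x => x)), hA, hB]
  ring

-- ===== VERDICT (by name: the statement is the Claim_ definition above) =====
theorem beautifulPairs_spec : Claim_equal_beautifulPairs := by
  intro A B _
  simp only [Spec_beautifulPairs, beautifulPairs, beautifulPairs_alt, counts_agree]
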